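-- pv_equiv track=rewrite | github.com/SuyeonChoi/Algorithms | Programmers/[월간 코드 챌린지]/season1_sep_3.py | solution
-- ===== SOURCE A (Python) =====
-- def solution(a):
--     answer = 0
--     if len(a) <= 2:
--         return len(a)
--
--     tmp = a[2:]
--     right = min(tmp)
--     left = a[0]
--     for i in range(len(a)):
--         if i == 0 or i == len(a)-1:
--             answer += 1
--             continue
--         mid = a[i]
--         if mid == right:
--             right = min(sorted(a[i+1:]))
--         if mid < left or mid < right:
--             answer += 1
--         if mid < left:
--             left = mid
--     return answer
-- ===== SOURCE B (Python) =====
-- def solution(a):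
--     n = len(a)
--     if n <= 2:
--         return n
--     # suffix minima, built back to front: suf[i] = min(a[i:])
--     suf = []
--     m = a[-1]
--     for x in reversed(a):
--         m = min(m, x)
--         suf.append(m)
--     suf.reverse()
--     count = 2
--     left = a[0]
--     for i in range(1, n - 1):
--         if a[i] < left or a[i] < suf[i + 1]:
--             count += 1
--         if a[i] < left:
--             left = a[i]
--     return count
-- ===== Notes on version B (the rewrite author's own statement) =====
-- stated objective: faster
-- what changed: replaces A's repeated min(sorted(a[i+1:])) recomputation inside the loop by a suffix-minimum array built once back-to-front, then a single pass with a running prefix minimum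
import Mathlib
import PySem

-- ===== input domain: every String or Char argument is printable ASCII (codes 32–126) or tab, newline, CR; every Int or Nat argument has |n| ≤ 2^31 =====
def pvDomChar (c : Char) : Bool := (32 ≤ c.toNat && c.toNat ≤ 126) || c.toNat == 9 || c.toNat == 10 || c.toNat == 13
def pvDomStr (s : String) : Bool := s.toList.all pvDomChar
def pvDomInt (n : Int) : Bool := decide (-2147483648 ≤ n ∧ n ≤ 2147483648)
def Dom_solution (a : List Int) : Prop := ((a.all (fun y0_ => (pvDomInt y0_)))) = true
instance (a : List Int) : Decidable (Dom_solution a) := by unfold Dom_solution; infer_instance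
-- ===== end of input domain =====

-- B replaces A's repeated min(sorted(a[i+1:])) inside the loop by a suffix-minimum array built once; return values agree everywhere.

-- ===== PORT A =====
-- loop body of A's 'for i in range(len(a))'; state = (answer, left, right)
def bodyA (a : List Int) (st : Int × Int × Int) (i : Int) : Int × Int × Int :=
  if i = 0 ∨ i = (a.length : Int) - 1 then (st.1 + 1, st.2.1, st.2.2)
  else
    let mid := PySem.List.pyGetD a i 0
    let right := if mid = st.2.2 then
        (PySem.List.min? (PySem.List.sorted (PySem.List.slice a (some (i+1)) none) (fun x => x) false) (fun x => x)).getD 0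
      else st.2.2
    let answer := if mid < st.2.1 ∨ mid < right then st.1 + 1 else st.1
    let left := if mid < st.2.1 then mid else st.2.1
    (answer, left, right)

def solution (a : List Int) : Int :=
  if a.length ≤ 2 then (a.length : Int) else
    let tmp := PySem.List.slice a (some 2) none
    -- min(tmp): tmp is nonempty here (len(a) ≥ 3), so Python's min never raises; .getD 0 is unreachable
    let right := (PySem.List.min? tmp (fun x => x)).getD 0
    let left := PySem.List.pyGetD a 0 0
    ((PySem.List.pyRange 0 (a.length : Int) 1).foldl (bodyA a) (0, left, right)).1

-- ===== PORT B =====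
-- loop body of B's 'for i in range(1, n-1)'; state = (count, left)
def bodyB (a suf : List Int) (st : Int × Int) (i : Int) : Int × Int :=
  let ai := PySem.List.pyGetD a i 0
  let count := if ai < st.2 ∨ ai < PySem.List.pyGetD suf (i+1) 0 then st.1 + 1 else st.1
  let left := if ai < st.2 then ai else st.2
  (count, left)

def solution_alt (a : List Int) : Int :=
  if a.length ≤ 2 then (a.length : Int) else
    let m0 := PySem.List.pyGetD a (-1) 0
    -- 'for x in reversed(a): m = min(m, x); suf.append(m)'
    let pr := a.reverse.foldl (fun (st : List Int × Int) x => (st.1 ++ [min st.2 x], min st.2 x)) ([], m0)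
    let suf := pr.1.reverse
    ((PySem.List.pyRange 1 ((a.length : Int) - 1) 1).foldl (bodyB a suf) (2, PySem.List.pyGetD a 0 0)).1

-- ===== PRECONDITION & SPEC =====
def Spec_solution (a : List Int) (out : Int) : Prop := out = solution_alt a
instance (a : List Int) (out : Int) : Decidable (Spec_solution a out) := by unfold Spec_solution; infer_instance

-- ===== CLAIM (what is proved, stated in full; the proofs are below) =====
def Claim_equal_solution : Prop := ∀ (a : List Int), Dom_solution a → Spec_solution a (solution a)

-- ===== LEMMAS AND PROOFS =====

-- min of a nonempty list (0 on [], never used there)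
def mnl : List Int → Int
  | [] => 0
  | x :: t => t.foldl min x

-- visibility count of the suffix, with 'left' the prefix minimum so far
def cv : Int → List Int → Int
  | _, [] => 0
  | _, [_] => 1
  | left, x :: y :: t => (if x < left ∨ x < mnl (y :: t) then 1 else 0) + cv (min left x) (y :: t)

-- suffix minima: sufList a = [min a[0:], min a[1:], …]
def sufList : List Int → List Int
  | [] => []
  | x :: t => mnl (x :: t) :: sufList t

-- running minima with seed m (what B's reversed-scan appends)
def scanmin : Int → List Int → List Int
  | _, [] => []
  | m, y :: t => min m y :: scanmin (min m y) t

lemma foldl_min_min (t : List Int) : ∀ (x y : Int), t.foldl min (min x y) = min x (t.foldl min y) := by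
  induction t with
  | nil => intro x y; rfl
  | cons z t ih =>
    intro x y
    simp only [List.foldl_cons, min_assoc]
    exact ih x (min y z)

lemma mnl_cons₂ (x y : Int) (t : List Int) : mnl (x :: y :: t) = min x (mnl (y :: t)) := by
  simp only [mnl, List.foldl_cons]
  exact foldl_min_min t x y

lemma foldl_min_reverse (t : List Int) : ∀ m : Int, t.reverse.foldl min m = t.foldl min m := by
  induction t with
  | nil => intro m; rfl
  | cons x t ih =>
    intro m
    simp only [List.reverse_cons, List.foldl_append, List.foldl_cons, List.foldl_nil, ih]
    rw [min_comm m x, foldl_min_min]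
    rw [min_comm x (t.foldl min m)]

lemma mnl_le (t : List Int) : ∀ v ∈ t, mnl t ≤ v := by
  induction t with
  | nil => intro v hv; simp at hv
  | cons x u ih =>
    intro v hv
    cases u with
    | nil => simp at hv; simp [mnl, hv]
    | cons y w =>
      rw [mnl_cons₂]
      rcases List.mem_cons.mp hv with rfl | hv
      · exact min_le_left _ _
      · exact le_trans (min_le_right _ _) (ih v hv)

lemma foldl_min_eq : ∀ (t : List Int), t ≠ [] → ∀ m : Int, t.foldl min m = min m (mnl t) := by
  intro t
  induction t with
  | nil => intro h; exact absurd rfl h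
  | cons y u ih =>
    intro _ m
    cases u with
    | nil => simp [mnl]
    | cons z w =>
      rw [List.foldl_cons, ih (by simp), mnl_cons₂, min_assoc]

lemma foldl_min_getLast (t : List Int) (h : t ≠ []) : t.foldl min (t.getLast h) = mnl t := by
  rw [foldl_min_eq t h]
  exact min_eq_right (mnl_le t _ (List.getLast_mem h))

lemma scanmin_append (ys : List Int) : ∀ (m x : Int),
    scanmin m (ys ++ [x]) = scanmin m ys ++ [min (ys.foldl min m) x] := by
  induction ys with
  | nil => intro m x; rfl
  | cons y t ih =>
    intro m x
    simp only [List.cons_append, scanmin, List.foldl_cons, ih]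

lemma foldB (ys : List Int) : ∀ (acc : List Int) (m : Int),
    ys.foldl (fun (st : List Int × Int) x => (st.1 ++ [min st.2 x], min st.2 x)) (acc, m)
      = (acc ++ scanmin m ys, ys.foldl min m) := by
  induction ys with
  | nil => intro acc m; simp [scanmin]
  | cons y t ih =>
    intro acc m
    simp only [List.foldl_cons, ih, scanmin, List.append_assoc, List.singleton_append]

lemma suf_eq : ∀ (a : List Int) (h : a ≠ []),
    (scanmin (a.getLast h) a.reverse).reverse = sufList a := by
  intro a
  induction a with
  | nil => intro h; exact absurd rfl h
  | cons x t ih =>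
    intro h
    cases t with
    | nil => simp [scanmin, sufList, mnl]
    | cons y u =>
      have ht : (y :: u) ≠ [] := by simp
      rw [List.getLast_cons ht]
      have : (x :: y :: u).reverse = (y :: u).reverse ++ [x] := by simp
      rw [this, scanmin_append, List.reverse_append, List.reverse_singleton,
        List.singleton_append, ih ht]
      rw [foldl_min_reverse, foldl_min_getLast (y :: u) ht]
      simp only [sufList]
      congr 1
      rw [mnl_cons₂ x y u, min_comm]

lemma sufList_getD : ∀ (a : List Int) (j : Nat), j < a.length → (sufList a).getD j 0 = mnl (a.drop j) := by
  intro a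
  induction a with
  | nil => intro j hj; simp at hj
  | cons x t ih =>
    intro j hj
    cases j with
    | zero => simp [sufList]
    | succ j =>
      simp only [sufList, List.getD_cons_succ, List.drop_succ_cons]
      exact ih j (by simpa using hj)

lemma min?_sorted (xs : List Int) :
    PySem.List.min? (PySem.List.sorted xs (fun x => x) false) (fun x => x)
      = PySem.List.min? xs (fun x => x) := by
  rcases h1 : PySem.List.min? (PySem.List.sorted xs (fun x => x) false) (fun x => x) with _ | m1
  · rw [PySem.List.min?_eq_none_iff, PySem.List.sorted_eq_nil_iff] at h1
    symm
    rw [PySem.List.min?_eq_none_iff]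
    exact h1
  · rcases h2 : PySem.List.min? xs (fun x => x) with _ | m2
    · exfalso
      rw [PySem.List.min?_eq_none_iff] at h2
      subst h2
      have hm := PySem.List.min?_mem h1
      rw [PySem.List.mem_sorted] at hm
      simp at hm
    · have hm1 : m1 ∈ xs := by
        have := PySem.List.min?_mem h1
        rwa [PySem.List.mem_sorted] at this
      have hm2 : m2 ∈ PySem.List.sorted xs (fun x => x) false := by
        rw [PySem.List.mem_sorted]
        exact PySem.List.min?_mem h2
      have h12 : m1 ≤ m2 := PySem.List.min?_isMin h1 m2 hm2
      have h21 : m2 ≤ m1 := PySem.List.min?_isMin h2 m1 hm1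
      rw [le_antisymm h12 h21]

-- the minimum value A recomputes: min(sorted(a[i+1:])) where a.drop (i+1) = y :: t
lemma minsorted_eq (a : List Int) (i : Nat) (y : Int) (t : List Int) (h : a.drop (i+1) = y :: t) :
    (PySem.List.min? (PySem.List.sorted (PySem.List.slice a (some ((i:Int)+1)) none) (fun x => x) false) (fun x => x)).getD 0
      = mnl (a.drop (i+1)) := by
  have hc : ((i:Int) + 1) = (((i+1 : Nat)) : Int) := by push_cast; ring
  rw [hc, PySem.List.slice_from_natCast, min?_sorted, h, PySem.List.min?_id_cons]
  simp [mnl]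

lemma drop_len_one (a : List Int) (i : Nat) (h : i + 1 = a.length) : ∃ x, a.drop i = [x] := by
  rcases hd : a.drop i with _ | ⟨x, u⟩
  · have hl := congrArg List.length hd
    rw [List.length_drop] at hl
    simp at hl
    omega
  · have hl := congrArg List.length hd
    rw [List.length_drop, List.length_cons] at hl
    have hu : u = [] := List.length_eq_zero_iff.mp (by omega)
    subst hu
    exact ⟨x, rfl⟩

lemma loopA (a : List Int) : ∀ (k i : Nat) (ans left right : Int),
    1 ≤ i → i + k = a.length → 1 ≤ k →
    (right = mnl (a.drop i) ∨ right = mnl (a.drop (i+1))) →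
    ((PySem.List.pyRange (i:Int) (a.length:Int) 1).foldl (bodyA a) (ans, left, right)).1
      = ans + cv left (a.drop i) := by
  intro k
  induction k with
  | zero => intro i ans left right h1 h2 h3 _; omega
  | succ k ih =>
    intro i ans left right h1 h2 _ hr
    rcases Nat.eq_zero_or_pos k with hk | hk
    · -- last index: i = a.length - 1
      subst hk
      have hin : (i:Int) < (a.length:Int) := by omega
      rw [PySem.List.pyRange_one_cons hin]
      have hend : PySem.List.pyRange ((i:Int)+1) (a.length:Int) 1 = [] :=
        PySem.List.pyRange_one_eq_nil (by omega)
      obtain ⟨x, hx⟩ := drop_len_one a i (by omega)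
      simp only [List.foldl_cons, hend, List.foldl_nil]
      rw [bodyA]
      rw [if_pos (Or.inr (by omega))]
      simp [hx, cv]
    · -- interior index
      have hi : i < a.length := by omega
      have hi1 : i + 1 < a.length := by omega
      have hx : a.drop i = a[i] :: a.drop (i+1) := List.drop_eq_getElem_cons hi
      obtain ⟨y, t, hyt⟩ : ∃ y t, a.drop (i+1) = y :: t :=
        ⟨a[i+1], a.drop (i+2), List.drop_eq_getElem_cons hi1⟩
      set x := a[i] with hxdef
      have hin : (i:Int) < (a.length:Int) := by omega
      rw [PySem.List.pyRange_one_cons hin, List.foldl_cons]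
      rw [bodyA, if_neg (by omega)]
      simp only []
      have hmid : PySem.List.pyGetD a (i:Int) 0 = x := by
        rw [PySem.List.pyGetD_natCast]
        simp [List.getD_eq_getElem?_getD, hi]
        exact hxdef.symm
      -- post-update right value is mnl (a.drop (i+1))
      have hms := minsorted_eq a i y t hyt
      have hmnl : mnl (a.drop i) = min x (mnl (a.drop (i+1))) := by
        rw [hx, hyt, mnl_cons₂, ← hyt]
      set s := mnl (a.drop (i+1)) with hs
      rw [hmid]
      have hright : (if x = right then
          (PySem.List.min? (PySem.List.sorted (PySem.List.slice a (some ((i:Int)+1)) none) (fun x => x) false) (fun x => x)).getD 0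
        else right) = s := by
        rcases hr with hr | hr
        · by_cases hxe : x = right
          · rw [if_pos hxe, hms]
          · rw [if_neg hxe]
            rw [hr, hmnl] at hxe ⊢
            rcases min_choice x s with hmin | hmin
            · exact absurd hmin.symm hxe
            · exact hmin
        · by_cases hxe : x = right
          · rw [if_pos hxe, hms]
          · rw [if_neg hxe, hr]
      rw [hright]
      have hnext := ih (i+1) (if x < left ∨ x < s then ans + 1 else ans)
        (if x < left then x else left) s (by omega) (by omega) hk (Or.inl rfl)
      have hcast : ((i:Int) + 1) = (((i+1:Nat)):Int) := by push_cast; ring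
      rw [hcast, hnext]
      have hcv : cv left (a.drop i) = (if x < left ∨ x < s then 1 else 0) + cv (min left x) (a.drop (i+1)) := by
        rw [hx, hyt, cv, ← hyt, ← hs]
      rw [hcv]
      have hminlx : (if x < left then x else left) = min left x := by
        by_cases h : x < left
        · rw [if_pos h, min_eq_right h.le]
        · rw [if_neg h, min_eq_left (by omega)]
      rw [hminlx]
      split_ifs <;> ring

lemma loopB (a suf : List Int) (hsuf : suf = sufList a) : ∀ (k i : Nat) (cnt left : Int),
    1 ≤ i → i + k + 1 = a.length →
    ((PySem.List.pyRange (i:Int) ((a.length:Int)-1) 1).foldl (bodyB a suf) (cnt, left)).1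
      = cnt + cv left (a.drop i) - 1 := by
  intro k
  induction k with
  | zero =>
    intro i cnt left h1 h2
    rw [PySem.List.pyRange_one_eq_nil (by omega), List.foldl_nil]
    obtain ⟨x, hx⟩ := drop_len_one a i (by omega)
    simp [hx, cv]
  | succ k ih =>
    intro i cnt left h1 h2
    have hi : i < a.length := by omega
    have hi1 : i + 1 < a.length := by omega
    have hx : a.drop i = a[i] :: a.drop (i+1) := List.drop_eq_getElem_cons hi
    set x := a[i] with hxdef
    rw [PySem.List.pyRange_one_cons (by omega), List.foldl_cons]
    rw [bodyB]
    simp only []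
    have hmid : PySem.List.pyGetD a (i:Int) 0 = x := by
      rw [PySem.List.pyGetD_natCast]
      simp [List.getD_eq_getElem?_getD, hi]
      exact hxdef.symm
    have hcast : ((i:Int) + 1) = (((i+1:Nat)):Int) := by push_cast; ring
    have hsufget : PySem.List.pyGetD suf ((i:Int)+1) 0 = mnl (a.drop (i+1)) := by
      rw [hcast, PySem.List.pyGetD_natCast, hsuf, sufList_getD a (i+1) hi1]
    rw [hmid, hsufget]
    set s := mnl (a.drop (i+1)) with hs
    have hnext := ih (i+1) (if x < left ∨ x < s then cnt + 1 else cnt)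
      (if x < left then x else left) (by omega) (by omega)
    rw [hcast, hnext]
    obtain ⟨y, t, hyt⟩ : ∃ y t, a.drop (i+1) = y :: t :=
      ⟨a[i+1], a.drop (i+2), List.drop_eq_getElem_cons hi1⟩
    have hcv : cv left (a.drop i) = (if x < left ∨ x < s then 1 else 0) + cv (min left x) (a.drop (i+1)) := by
      rw [hx, hyt, cv, ← hyt, ← hs]
    rw [hcv]
    have hminlx : (if x < left then x else left) = min left x := by
      by_cases h : x < left
      · rw [if_pos h, min_eq_right h.le]
      · rw [if_neg h, min_eq_left (by omega)]
    rw [hminlx]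
    split_ifs <;> ring

-- ===== VERDICT (by name: the statement is the Claim_ definition above) =====
theorem solution_spec : Claim_equal_solution := by
  intro a _
  unfold Spec_solution
  by_cases hlen : a.length ≤ 2
  · unfold solution solution_alt
    rw [if_pos hlen, if_pos hlen]
  · obtain ⟨a0, a1, y, t, rfl⟩ : ∃ a0 a1 y t, a = a0 :: a1 :: y :: t := by
      rcases a with _ | ⟨a0, _ | ⟨a1, _ | ⟨y, t⟩⟩⟩ <;> simp_all
    have hlen3 : (a0 :: a1 :: y :: t).length = t.length + 3 := by simp
    have hne : ¬ ((a0 :: a1 :: y :: t).length ≤ 2) := by rw [hlen3]; omega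
    have hd1 : (a0 :: a1 :: y :: t).drop 1 = a1 :: y :: t := rfl
    have hd2 : (a0 :: a1 :: y :: t).drop 2 = y :: t := rfl
    have hA : solution (a0 :: a1 :: y :: t) = 1 + cv a0 (a1 :: y :: t) := by
      unfold solution
      rw [if_neg hne]
      simp only []
      have h2 : (2:Int) = ((2:Nat):Int) := by norm_num
      rw [h2, PySem.List.slice_from_natCast, hd2, PySem.List.min?_id_cons]
      rw [PySem.List.pyGetD_zero_cons]
      have h0 : (0:Int) < (((a0 :: a1 :: y :: t).length : Nat) : Int) := by
        rw [hlen3]; push_cast; omega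
      rw [PySem.List.pyRange_one_cons h0, List.foldl_cons]
      rw [bodyA, if_pos (Or.inl rfl)]
      norm_num
      have hmain := loopA (a0 :: a1 :: y :: t) (t.length + 2) 1 1 a0
        (List.foldl min y t) (by omega) (by rw [hlen3]; omega) (by omega) (Or.inr rfl)
      simp only [Nat.cast_one] at hmain
      rw [hd1] at hmain
      exact hmain
    have hB : solution_alt (a0 :: a1 :: y :: t) = 1 + cv a0 (a1 :: y :: t) := by
      unfold solution_alt
      rw [if_neg hne]
      simp only []
      have hne' : (a0 :: a1 :: y :: t) ≠ [] := by simp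
      rw [PySem.List.pyGetD_neg_one _ 0 hne', foldB, List.nil_append, suf_eq _ hne']
      rw [PySem.List.pyGetD_zero_cons]
      have hmainB := loopB (a0 :: a1 :: y :: t) (sufList (a0 :: a1 :: y :: t)) rfl
        (t.length + 1) 1 2 a0 (by omega) (by rw [hlen3]; omega)
      simp only [Nat.cast_one] at hmainB
      rw [hd1] at hmainB
      rw [hmainB]
      ring
    rw [hA, hB]
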